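-- pv_equiv track=rewrite | github.com/ndedioss/AI-Final-Project | src/aggregator.py | get_insights_by_category
-- ===== SOURCE A (Python) =====
-- from typing import List, Dict, Tuple
--
-- PRIORITY_SCORE_MAP = {
--     "Critical": 4,
--     "High": 3,
--     "Medium": 2,
--     "Low": 1
-- }
--
-- def get_insights_by_category(insights_list: List[Dict]) -> Dict[str, List[Dict]]:
--     """
--     Organize insights by category/topic.
--
--     Args:
--         insights_list: List of insight dictionaries
--
--     Returns:
--         Dictionary with topics as keys and lists of insights as values
--     """
--     by_category = {}
--
--     for insight in insights_list:
--         topic = insight.get("topic", "Other")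
--         if topic not in by_category:
--             by_category[topic] = []
--         by_category[topic].append(insight)
--
--     # Sort each category by priority
--     for topic in by_category:
--         by_category[topic].sort(
--             key=lambda x: PRIORITY_SCORE_MAP.get(x["priority_level"], 2),
--             reverse=True
--         )
--
--     return by_category
-- ===== SOURCE B (Python) =====
-- from typing import List, Dict
--
-- PRIORITY_SCORE_MAP = {
--     "Critical": 4,
--     "High": 3,
--     "Medium": 2,
--     "Low": 1
-- }
--
-- def get_insights_by_category(insights_list):
--     # Collect topics in first-appearance order, then build the result directly
--     # as a dict comprehension: each bucket is the sorted filter of the whole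
--     # list (no incremental bucketing dict, no in-place per-bucket sorts).
--     topics = []
--     for insight in insights_list:
--         t = insight.get("topic", "Other")
--         if t not in topics:
--             topics.append(t)
--     return {
--         t: sorted(
--             (x for x in insights_list if x.get("topic", "Other") == t),
--             key=lambda x: PRIORITY_SCORE_MAP.get(x["priority_level"], 2),
--             reverse=True,
--         )
--         for t in topics
--     }
-- ===== Notes on version B (the rewrite author's own statement) =====
-- stated objective: alternative
-- what changed: A buckets incrementally into a dict and then sorts each bucket in place; B never builds an intermediate mutable dict: it records topics in first-appearance order and produces the result as a dict comprehension whose value for each topic is the stably sorted filter of the whole input list.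
import Mathlib
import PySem

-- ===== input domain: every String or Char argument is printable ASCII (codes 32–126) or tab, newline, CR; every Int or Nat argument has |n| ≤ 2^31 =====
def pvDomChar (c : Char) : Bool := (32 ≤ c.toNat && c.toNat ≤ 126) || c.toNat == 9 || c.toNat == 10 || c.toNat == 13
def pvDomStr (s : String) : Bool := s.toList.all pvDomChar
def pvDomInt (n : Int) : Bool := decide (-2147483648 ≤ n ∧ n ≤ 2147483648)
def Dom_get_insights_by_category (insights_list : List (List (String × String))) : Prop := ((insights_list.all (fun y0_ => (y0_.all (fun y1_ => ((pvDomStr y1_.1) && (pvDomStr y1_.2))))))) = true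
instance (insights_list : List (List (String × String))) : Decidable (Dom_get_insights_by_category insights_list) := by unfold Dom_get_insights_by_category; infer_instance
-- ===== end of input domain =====

-- B builds the result as a comprehension over first-appearance topics, each bucket a sorted filter
-- of the whole list, instead of A's incremental dict bucketing plus per-bucket in-place sorts;
-- return-value equivalence proved where every insight has a "priority_level" key (else Python raises KeyError).

-- ===== PORT A =====
-- module constant PRIORITY_SCORE_MAP
def pvPriorityMap : PySem.Dict String Int :=
  PySem.Dict.ofList [("Critical", 4), ("High", 3), ("Medium", 2), ("Low", 1)]

-- insight.get("topic", "Other")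
def pvTopic (insight : List (String × String)) : String :=
  (PySem.Dict.mk insight).getD "topic" "Other"

-- lambda x: PRIORITY_SCORE_MAP.get(x["priority_level"], 2); the subscript is ported via getD ""
-- (exact wherever the key is present, i.e. on all of Pre_; Python raises KeyError otherwise)
def pvScore (x : List (String × String)) : Int :=
  pvPriorityMap.getD ((PySem.Dict.mk x).getD "priority_level" "") 2

def get_insights_by_category (insights_list : List (List (String × String))) : List (String × List (List (String × String))) :=
  -- first loop: bucket the insights by topic
  let by_category : PySem.Dict String (List (List (String × String))) :=
    insights_list.foldl
      (fun d insight => d.modify (pvTopic insight) [] (fun v => v ++ [insight]))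
      PySem.Dict.empty
  -- second loop: for topic in by_category: by_category[topic].sort(key=…, reverse=True)
  let sortedD :=
    by_category.keys.foldl
      (fun d topic => d.modify topic [] (fun v => PySem.List.sorted v pvScore true))
      by_category
  sortedD.items

-- ===== PORT B =====
def get_insights_by_category_alt (insights_list : List (List (String × String))) : List (String × List (List (String × String))) :=
  -- topics in first-appearance order: for insight: t = insight.get("topic","Other"); if t not in topics: topics.append(t)
  let topics : List String :=
    insights_list.foldl
      (fun ts insight =>
        let t := (PySem.Dict.mk insight).getD "topic" "Other"
        if ts.contains t then ts else ts ++ [t])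
      []
  -- {t: sorted((x for x in insights_list if x.get("topic","Other") == t), key=…, reverse=True) for t in topics}
  topics.map (fun t =>
    (t, PySem.List.sorted
          (insights_list.filter (fun x => (PySem.Dict.mk x).getD "topic" "Other" == t))
          (fun x => pvPriorityMap.getD ((PySem.Dict.mk x).getD "priority_level" "") 2)
          true))

-- ===== PRECONDITION & SPEC =====
-- Pre_ excludes exactly the inputs where some insight lacks the "priority_level" key: there
-- Python A (and Python B) raise KeyError inside the sort key.
def Pre_get_insights_by_category (insights_list : List (List (String × String))) : Prop :=
  insights_list.all (fun insight => insight.any (fun kv => kv.1 == "priority_level")) = true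

instance (insights_list : List (List (String × String))) : Decidable (Pre_get_insights_by_category insights_list) := by
  unfold Pre_get_insights_by_category; infer_instance

def pvWitness_get_insights_by_category : (List (List (String × String))) :=
  [[("topic", "Perf"), ("priority_level", "High")], [("priority_level", "Low")]]

def Spec_get_insights_by_category (insights_list : List (List (String × String))) (out : List (String × List (List (String × String)))) : Prop := out = get_insights_by_category_alt insights_list
instance (insights_list : List (List (String × String))) (out : List (String × List (List (String × String)))) : Decidable (Spec_get_insights_by_category insights_list out) := by unfold Spec_get_insights_by_category; infer_instance

-- ===== CLAIM (what is proved, stated in full; the proofs are below) =====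
def Claim_equal_get_insights_by_category : Prop := ∀ (insights_list : List (List (String × String))), Dom_get_insights_by_category insights_list → Pre_get_insights_by_category insights_list → Spec_get_insights_by_category insights_list (get_insights_by_category insights_list)

-- ===== LEMMAS AND PROOFS =====

-- the grouping loop: bucket of t = previous bucket ++ insights whose topic is t, in order
theorem pv_getD_groupFold (l : List (List (String × String)))
    (d : PySem.Dict String (List (List (String × String)))) (t : String) :
    (l.foldl (fun d insight => d.modify (pvTopic insight) [] (fun v => v ++ [insight])) d).getD t []
      = d.getD t [] ++ l.filter (fun insight => pvTopic insight == t) := by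
  have hmap : l.foldl (fun d insight => d.modify (pvTopic insight) [] (fun v => v ++ [insight])) d
      = (l.map (fun insight => (pvTopic insight, insight))).foldl
          (fun d p => d.modify p.1 [] (fun v => v ++ [p.2])) d := by
    rw [List.foldl_map]
  rw [hmap, PySem.Dict.getD_foldl_modify_append]
  congr 1
  rw [List.filter_map, List.map_map]
  show List.map (fun insight => insight) (List.filter (fun insight => pvTopic insight == t) l)
      = List.filter (fun insight => pvTopic insight == t) l
  exact List.map_id' _

-- the per-topic sorting loop over the dict's own (nodup) keys applies f once to each bucket
theorem pv_getD_sortFold (ks : List String) (hnd : ks.Nodup)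
    (d : PySem.Dict String (List (List (String × String))))
    (f : List (List (String × String)) → List (List (String × String))) (t : String) :
    (ks.foldl (fun d k => d.modify k [] f) d).getD t []
      = if t ∈ ks then f (d.getD t []) else d.getD t [] := by
  induction ks generalizing d with
  | nil => simp
  | cons k ks ih =>
    rcases List.nodup_cons.mp hnd with ⟨hk, hnd'⟩
    simp only [List.foldl_cons]
    rw [ih hnd']
    by_cases ht : t = k
    · subst ht
      simp [hk, PySem.Dict.getD_modify_self]
    · rw [PySem.Dict.getD_modify_of_ne _ _ _ ht]
      simp [ht]

-- updating a set with elements it already has leaves it unchanged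
theorem pv_update_self {α : Type} [BEq α] [LawfulBEq α] (s : PySem.Set α) (xs : List α)
    (h : ∀ y ∈ xs, y ∈ s) : PySem.Set.update s xs = s := by
  rw [PySem.Set.update_eq_append_filter]
  have : List.filter (fun y => !PySem.Set.contains s y) (PySem.Set.ofList xs) = [] := by
    rw [List.filter_eq_nil_iff]
    intro y hy
    simp [PySem.Set.contains, h y ((PySem.Set.mem_ofList xs y).mp hy)]
  rw [this, List.append_nil]

-- ===== VERDICT (by name: the statement is the Claim_ definition above) =====
theorem get_insights_by_category_spec : Claim_equal_get_insights_by_category := by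
  intro l _ _
  unfold Spec_get_insights_by_category get_insights_by_category get_insights_by_category_alt
  simp only []
  set K : List String := PySem.Set.ofList (l.map pvTopic) with hKdef
  have hnd : K.Nodup := PySem.Set.nodup_ofList _
  set D1 : PySem.Dict String (List (List (String × String))) :=
    l.foldl (fun d insight => d.modify (pvTopic insight) [] (fun v => v ++ [insight]))
      PySem.Dict.empty with hD1
  have hupdnil : ∀ xs : List String, PySem.Set.update ([] : PySem.Set String) xs = PySem.Set.ofList xs := by
    intro xs; rw [PySem.Set.ofList_eq_foldl]; rfl
  -- B's topic loop computes K
  have htopics :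
      (l.foldl (fun ts insight =>
          let t := (PySem.Dict.mk insight).getD "topic" "Other"
          if ts.contains t then ts else ts ++ [t]) ([] : List String)) = K := by
    have h1 : (l.foldl (fun ts insight =>
          let t := (PySem.Dict.mk insight).getD "topic" "Other"
          if ts.contains t then ts else ts ++ [t]) ([] : List String))
        = l.foldl (fun ts insight => PySem.Set.add ts (pvTopic insight)) [] := by
      congr 1
    rw [h1, ← List.foldl_map (f := pvTopic) (g := PySem.Set.add), ← PySem.Set.ofList_eq_foldl]
  -- A's keys after both loops are K
  have hK1 : D1.keys = K := by
    rw [hD1, PySem.Dict.keys_foldl_modify_key l pvTopic [] (fun _ insight v => v ++ [insight])]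
    rw [PySem.Dict.keys_empty, hupdnil]
  have hKA : (D1.keys.foldl (fun d topic => d.modify topic []
      (fun v => PySem.List.sorted v pvScore true)) D1).keys = K := by
    rw [PySem.Dict.keys_foldl_modify D1.keys [] (fun _ _ v => PySem.List.sorted v pvScore true)]
    rw [hK1]
    exact pv_update_self K K (fun y hy => hy)
  rw [PySem.Dict.items_eq_map_keys _ (by rw [hKA]; exact hnd) ([]), hKA, htopics]
  apply List.map_congr_left
  intro t ht
  have hA : (D1.keys.foldl (fun d topic => d.modify topic []
      (fun v => PySem.List.sorted v pvScore true)) D1).getD t []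
      = PySem.List.sorted (l.filter (fun insight => pvTopic insight == t)) pvScore true := by
    rw [pv_getD_sortFold D1.keys (by rw [hK1]; exact hnd) D1 _ t]
    rw [hK1, if_pos ht, hD1, pv_getD_groupFold l PySem.Dict.empty t]
    simp [PySem.Dict.getD_empty]
  rw [hA]
  rfl
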